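-- pv_equiv track=rewrite | github.com/jenul-ferdinand/fit2004 | wk04/prob5.py | k_partition_naive
-- ===== SOURCE A (Python) =====
-- from typing import List, TypeVar
--
-- T = TypeVar('T')
--
-- def k_partition_naive(A: List[T], pivots: List[T]) -> List[T]:
--     """
--     Partition a list A into k+1 regions defined by k pivot values.
--     """
--     # 1. Sort the pivots
--     sorted_pivots = sorted(pivots)
--     k = len(sorted_pivots)
--
--     # 2. Create k+1 empty buckets
--     buckets = [[] for _ in range(k+1)]
--
--     # 3. Assign each element of A to the appropriate bucket
--     for x in A:
--         placed = False
--         for i, pivot in enumerate(sorted_pivots):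
--             if x <= pivot:
--                 buckets[i].append(x)
--                 placed = True
--                 break
--
--         if not placed:
--             buckets[k].append(x)
--
--     # 4. Concatenate all buckets in order
--     result = []
--     for bucket in buckets:
--         result.extend(bucket)
--
--     return result
-- ===== SOURCE B (Python) =====
-- from typing import List, TypeVar
--
-- T = TypeVar('T')
--
-- def k_partition_naive(A: List[T], pivots: List[T]) -> List[T]:
--     """Partition A into k+1 regions: bucket index found by binary search on the sorted pivots."""
--     sorted_pivots = sorted(pivots)
--     k = len(sorted_pivots)
--     buckets = [[] for _ in range(k + 1)]
--     for x in A: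
--         lo, hi = 0, k
--         while lo < hi:
--             mid = (lo + hi) // 2
--             if sorted_pivots[mid] < x:
--                 lo = mid + 1
--             else:
--                 hi = mid
--         buckets[lo].append(x)
--     return [y for bucket in buckets for y in bucket]
-- ===== Notes on version B (the rewrite author's own statement) =====
-- stated objective: faster
-- what changed: The O(k) inner linear scan over the sorted pivots per element is replaced by a hand-written binary search (bisect_left), and the bucket concatenation by a flattening comprehension.
import Mathlib
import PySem

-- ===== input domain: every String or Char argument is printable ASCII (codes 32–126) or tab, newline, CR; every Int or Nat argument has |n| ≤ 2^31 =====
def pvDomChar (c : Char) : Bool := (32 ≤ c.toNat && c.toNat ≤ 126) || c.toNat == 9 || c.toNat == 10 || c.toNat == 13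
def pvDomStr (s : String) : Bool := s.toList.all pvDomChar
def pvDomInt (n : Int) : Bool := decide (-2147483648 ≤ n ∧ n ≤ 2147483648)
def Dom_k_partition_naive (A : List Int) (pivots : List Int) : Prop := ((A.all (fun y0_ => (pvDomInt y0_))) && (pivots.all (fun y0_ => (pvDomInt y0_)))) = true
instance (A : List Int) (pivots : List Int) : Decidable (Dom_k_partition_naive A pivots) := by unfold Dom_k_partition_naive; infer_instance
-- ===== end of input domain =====

-- B replaces A's O(k) inner linear scan over the pivots by a hand-written binary search
-- (O(log k) per element) and flattens the buckets with a comprehension; same return value.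

-- ===== PORT A =====
-- inner 'for i, pivot in enumerate(sorted_pivots): if x <= pivot: … break' — returns the
-- index of the first pivot with x ≤ pivot (none = not placed)
def kpnInner (x : Int) : List Int → Nat → Option Nat
  | [], _ => none
  | p :: ps, i => if x ≤ p then some i else kpnInner x ps (i + 1)

def k_partition_naive (A : List Int) (pivots : List Int) : List Int :=
  let sortedPivots := PySem.List.sorted pivots (fun v => v) false
  let k := sortedPivots.length
  let buckets0 := List.replicate (k + 1) ([] : List Int)
  let buckets := A.foldl (fun b x =>
    match kpnInner x sortedPivots 0 with
    | some i => b.modify i (fun bk => bk ++ [x])   -- placed: buckets[i].append(x)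
    | none   => b.modify k (fun bk => bk ++ [x])   -- not placed: buckets[k].append(x)
    ) buckets0
  buckets.foldl (fun r bk => r ++ bk) []           -- result.extend(bucket)

-- ===== PORT B =====
-- the 'while lo < hi' binary-search loop of Source B (fuel = hi - lo bounds the iteration
-- count exactly, so the guard 'lo < hi' always fires while fuel remains; structural
-- recursion keeps the definition kernel-reducible)
def kpnBisectGo (sp : List Int) (x : Int) : Nat → Nat → Nat → Nat
  | 0, lo, _ => lo
  | fuel + 1, lo, hi =>
    if lo < hi then
      let mid := (lo + hi) / 2
      if PySem.List.pyGetD sp (mid : Int) 0 < x then kpnBisectGo sp x fuel (mid + 1) hi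
      else kpnBisectGo sp x fuel lo mid
    else lo

def kpnBisect (sp : List Int) (x : Int) (lo hi : Nat) : Nat :=
  kpnBisectGo sp x (hi - lo) lo hi

def k_partition_naive_alt (A : List Int) (pivots : List Int) : List Int :=
  let sortedPivots := PySem.List.sorted pivots (fun v => v) false
  let k := sortedPivots.length
  let buckets := A.foldl
    (fun b x => b.modify (kpnBisect sortedPivots x 0 k) (fun bk => bk ++ [x]))
    (List.replicate (k + 1) ([] : List Int))
  buckets.flatMap (fun bk => bk)                   -- [y for bucket in buckets for y in bucket]

-- ===== PRECONDITION & SPEC =====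
def Spec_k_partition_naive (A : List Int) (pivots : List Int) (out : List Int) : Prop := out = k_partition_naive_alt A pivots
instance (A : List Int) (pivots : List Int) (out : List Int) : Decidable (Spec_k_partition_naive A pivots out) := by unfold Spec_k_partition_naive; infer_instance

-- ===== CLAIM (what is proved, stated in full; the proofs are below) =====
def Claim_equal_k_partition_naive : Prop := ∀ (A : List Int) (pivots : List Int), Dom_k_partition_naive A pivots → Spec_k_partition_naive A pivots (k_partition_naive A pivots)

-- ===== LEMMAS AND PROOFS =====

-- proof-side linear-scan index: first index with x ≤ p, = length if none
def kpnLin (x : Int) : List Int → Nat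
  | [] => 0
  | p :: ps => if x ≤ p then 0 else kpnLin x ps + 1

theorem kpnLin_le_length (x : Int) (sp : List Int) : kpnLin x sp ≤ sp.length := by
  induction sp with
  | nil => simp [kpnLin]
  | cons p ps ih =>
    simp only [kpnLin]
    split
    · simp
    · simp
      omega

theorem kpnLin_lt (x : Int) (sp : List Int) (j : Nat) (hj : j < sp.length)
    (h : j < kpnLin x sp) : sp[j] < x := by
  induction sp generalizing j with
  | nil => simp at hj
  | cons p ps ih =>
    simp only [kpnLin] at h
    by_cases hxp : x ≤ p
    · simp [hxp] at h
    · simp only [if_neg hxp] at h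
      cases j with
      | zero => simp only [List.getElem_cons_zero]; omega
      | succ j' => exact ih j' (by simpa using hj) (by omega)

theorem kpnLin_at (x : Int) (sp : List Int) (h : kpnLin x sp < sp.length) :
    x ≤ sp[kpnLin x sp] := by
  induction sp with
  | nil => simp at h
  | cons p ps ih =>
    by_cases hxp : x ≤ p
    · simp [kpnLin, hxp]
    · have h' : kpnLin x ps < ps.length := by
        rw [kpnLin, if_neg hxp] at h; simpa using h
      have hg : x ≤ ps[kpnLin x ps] := ih h'
      simpa [kpnLin, hxp] using hg

theorem kpnInner_eq (x : Int) (sp : List Int) (i : Nat) :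
    kpnInner x sp i = if kpnLin x sp < sp.length then some (i + kpnLin x sp) else none := by
  induction sp generalizing i with
  | nil => simp [kpnInner, kpnLin]
  | cons p ps ih =>
    simp only [kpnInner, kpnLin]
    split
    · simp
    · rw [ih]
      by_cases h : kpnLin x ps < ps.length
      · simp [h]; omega
      · simp [h]

theorem kpnBisectGo_eq (sp : List Int) (x : Int)
    (hs : List.Pairwise (fun a b => a ≤ b) sp) :
    ∀ (n lo hi : Nat), hi - lo ≤ n → lo ≤ kpnLin x sp → kpnLin x sp ≤ hi →
      hi ≤ sp.length → kpnBisectGo sp x n lo hi = kpnLin x sp := by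
  intro n
  induction n with
  | zero => intro lo hi hn h1 h2 h3; simp only [kpnBisectGo]; omega
  | succ m ih =>
    intro lo hi hn h1 h2 h3
    rw [kpnBisectGo]
    by_cases hlt : lo < hi
    · simp only [if_pos hlt]
      set mid := (lo + hi) / 2 with hmid
      have hmlo : lo ≤ mid := by omega
      have hmhi : mid < hi := by omega
      have hml : mid < sp.length := by omega
      rw [PySem.List.pyGetD_natCast, List.getD_eq_getElem?_getD, List.getElem?_eq_getElem hml]
      simp only [Option.getD_some]
      by_cases hc : sp[mid] < x
      · simp only [if_pos hc]
        -- kpnLin > mid: else x ≤ sp[kpnLin] ≤ sp[mid] < x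
        have hgt : mid < kpnLin x sp := by
          by_contra hle
          have hle : kpnLin x sp ≤ mid := by omega
          have hlen : kpnLin x sp < sp.length := by omega
          have h4 : x ≤ sp[kpnLin x sp] := kpnLin_at x sp hlen
          have h5 : sp[kpnLin x sp] ≤ sp[mid] := by
            rcases Nat.lt_or_ge (kpnLin x sp) mid with h | h
            · exact (List.pairwise_iff_getElem.mp hs) _ _ hlen hml h
            · have : kpnLin x sp = mid := by omega
              simp [this]
          omega
        exact ih (mid + 1) hi (by omega) (by omega) h2 h3
      · simp only [if_neg hc]
        have hle : kpnLin x sp ≤ mid := by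
          by_contra hgt
          have hgt : mid < kpnLin x sp := by omega
          exact hc (lt_of_lt_of_le (kpnLin_lt x sp mid hml hgt) (le_refl x))
        exact ih lo mid (by omega) h1 hle (by omega)
    · simp only [if_neg hlt]; omega

theorem foldl_append_eq_flatten (l : List (List Int)) (acc : List Int) :
    l.foldl (fun r bk => r ++ bk) acc = acc ++ l.flatMap (fun bk => bk) := by
  induction l generalizing acc with
  | nil => simp
  | cons b bs ih => simp [List.foldl_cons, ih]

-- ===== VERDICT (by name: the statement is the Claim_ definition above) =====
theorem k_partition_naive_spec : Claim_equal_k_partition_naive := by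
  intro A pivots _
  unfold Spec_k_partition_naive k_partition_naive k_partition_naive_alt
  simp only
  set sp := PySem.List.sorted pivots (fun v => v) false with hsp
  have hs : List.Pairwise (fun a b => a ≤ b) sp :=
    PySem.List.sorted_pairwise pivots (fun v => v)
  have hupd : (fun (b : List (List Int)) (x : Int) =>
      match kpnInner x sp 0 with
      | some i => b.modify i (fun bk => bk ++ [x])
      | none   => b.modify sp.length (fun bk => bk ++ [x]))
    = (fun b x => b.modify (kpnBisect sp x 0 sp.length) (fun bk => bk ++ [x])) := by
    funext b x
    have hb : kpnBisect sp x 0 sp.length = kpnLin x sp := by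
      rw [kpnBisect]
      exact kpnBisectGo_eq sp x hs (sp.length - 0) 0 sp.length (by omega) (by omega)
        (kpnLin_le_length x sp) (le_refl _)
    rw [kpnInner_eq, hb]
    by_cases h : kpnLin x sp < sp.length
    · simp [h]
    · have : kpnLin x sp = sp.length := by
        have := kpnLin_le_length x sp; omega
      simp [this]
  rw [hupd, foldl_append_eq_flatten]
  simp
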